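-- pv_equiv track=rewrite | github.com/highlightime/IntelliP | src/intellip/crawler.py | parse_depth_links
-- ===== SOURCE A (Python) =====
-- def find_nth_occurrence(string, char, n):
--     pos = -1
--     for i in range(n):
--         pos = string.find(char, pos + 1)
--         if pos == -1:
--             return -1
--     return pos
--
-- def parse_depth_links(links, domain, depth):
--     depth_parsed_links = []
--     for link in links:
--         # 1 depth 이상 링크는 1 depth로 제한
--         if link.count('/') > (2+depth):
--             # 3번째 / 이후로는 제거
--             link_index = find_nth_occurrence(link, '/', 3+depth)
--             link=link[:link_index]
--             # 중복 링크 제거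
--         if link in depth_parsed_links:
--             continue
--         depth_parsed_links.append(link)
--     return depth_parsed_links
-- ===== SOURCE B (Python) =====
-- def parse_depth_links(links, domain, depth):
--     out = []
--     for link in links:
--         truncated = '/'.join(link.split('/')[:3 + depth])
--         if truncated not in out:
--             out.append(truncated)
--     return out
-- ===== Notes on version B (the rewrite author's own statement) =====
-- stated objective: simpler
-- what changed: B drops the find_nth_occurrence helper and the slash-count guard entirely: every link is truncated by one unconditional split('/')[:3+depth] and '/'.join, instead of counting slashes and then re-scanning the string with repeated find calls to locate the (3+depth)-th slash.
-- intended difference: For depth <= -3 with a nonempty link list, A truncates every link to link[:-1] (find_nth_occurrence's -1 sentinel leaks into the slice, chopping the last character), while B keeps the first 3+depth '/'-separated segments per Python slice semantics; B's uniform truncation is the intended behaviour. — e.g. on parse_depth_links(["ab"], "", -3): A returns ["a"], B returns [""]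
import Mathlib
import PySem

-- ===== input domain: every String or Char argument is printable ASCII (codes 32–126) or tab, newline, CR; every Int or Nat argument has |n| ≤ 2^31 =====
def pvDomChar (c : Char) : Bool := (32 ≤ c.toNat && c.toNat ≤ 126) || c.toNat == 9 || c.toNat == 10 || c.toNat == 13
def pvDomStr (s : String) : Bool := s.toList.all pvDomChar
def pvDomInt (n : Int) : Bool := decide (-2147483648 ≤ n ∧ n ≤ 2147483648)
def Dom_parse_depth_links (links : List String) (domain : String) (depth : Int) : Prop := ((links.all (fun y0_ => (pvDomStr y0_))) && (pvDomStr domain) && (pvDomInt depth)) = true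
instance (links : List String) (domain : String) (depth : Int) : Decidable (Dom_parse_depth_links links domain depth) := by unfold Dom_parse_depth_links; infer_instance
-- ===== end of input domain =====

-- B replaces A's find_nth_occurrence helper and slash-count guard with one unconditional
-- split/slice/rejoin per link (objective: simpler); on depth ≤ -3 B's truncation is the intended
-- one while A's last-character chop is accidental (see D_ below).

-- ===== PORT A =====
-- loop body of find_nth_occurrence: 'for i in range(n): pos = string.find(char, pos+1); if pos == -1: return -1'
def find_nth_go (s ch : String) : Nat → Int → Int
  | 0, pos => pos
  | i + 1, pos =>
      let p := PySem.Str.findFrom s ch (pos + 1)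
      if p = -1 then -1 else find_nth_go s ch i p

def find_nth_occurrence (s ch : String) (n : Int) : Int :=
  find_nth_go s ch n.toNat (-1)

def parse_depth_links (links : List String) (domain : String) (depth : Int) : List String :=
  links.foldl (fun acc link0 =>
    let link :=
      if ((PySem.Str.count link0 "/" : Int) > 2 + depth) then
        PySem.Str.slice link0 none (some (find_nth_occurrence link0 "/" (3 + depth)))
      else link0
    if acc.contains link then acc else acc ++ [link]) []

-- ===== PORT B =====
def parse_depth_links_alt (links : List String) (domain : String) (depth : Int) : List String :=
  links.foldl (fun out link =>
    let t := PySem.Str.join "/"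
      (PySem.List.slice ((PySem.Str.split? link "/").getD []) none (some (3 + depth)))
    if out.contains t then out else out ++ [t]) []

-- ===== PRECONDITION & SPEC =====
-- For depth ≤ -3 (so 3+depth ≤ 0) and a nonempty link list, A's find_nth_occurrence returns -1 and
-- link[:-1] chops the last character of every link — an accident of the helper's -1 sentinel — while
-- B uniformly keeps the first 3+depth '/'-separated segments (Python slice semantics), the intended truncation.
def D_parse_depth_links (links : List String) (domain : String) (depth : Int) : Prop :=
  depth ≤ -3 ∧ links ≠ []
instance (links : List String) (domain : String) (depth : Int) : Decidable (D_parse_depth_links links domain depth) := by unfold D_parse_depth_links; infer_instance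

def Spec_parse_depth_links (links : List String) (domain : String) (depth : Int) (out : List String) : Prop := ¬ D_parse_depth_links links domain depth → out = parse_depth_links_alt links domain depth
instance (links : List String) (domain : String) (depth : Int) (out : List String) : Decidable (Spec_parse_depth_links links domain depth out) := by unfold Spec_parse_depth_links; infer_instance

def pvDiffWitness_parse_depth_links : List String × String × Int := (["ab"], "", -3)
def pvDiffWitnessOut_parse_depth_links : (List String) × (List String) := (["a"], [""])

-- ===== CLAIM (what is proved, stated in full; the proofs are below) =====
def Claim_unchanged_parse_depth_links : Prop := ∀ (links : List String) (domain : String) (depth : Int), Dom_parse_depth_links links domain depth → Spec_parse_depth_links links domain depth (parse_depth_links links domain depth)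
def Claim_changed_parse_depth_links : Prop := Dom_parse_depth_links (pvDiffWitness_parse_depth_links.1) (pvDiffWitness_parse_depth_links.2.1) (pvDiffWitness_parse_depth_links.2.2) ∧ D_parse_depth_links (pvDiffWitness_parse_depth_links.1) (pvDiffWitness_parse_depth_links.2.1) (pvDiffWitness_parse_depth_links.2.2) ∧ parse_depth_links (pvDiffWitness_parse_depth_links.1) (pvDiffWitness_parse_depth_links.2.1) (pvDiffWitness_parse_depth_links.2.2) = pvDiffWitnessOut_parse_depth_links.1 ∧ parse_depth_links_alt (pvDiffWitness_parse_depth_links.1) (pvDiffWitness_parse_depth_links.2.1) (pvDiffWitness_parse_depth_links.2.2) = pvDiffWitnessOut_parse_depth_links.2 ∧ pvDiffWitnessOut_parse_depth_links.1 ≠ pvDiffWitnessOut_parse_depth_links.2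

-- ===== LEMMAS AND PROOFS =====
-- reference split on the single character '/' (structural form of Chars.splitOn _ ['/']) and
-- reference truncation: everything before the k-th '/' (the whole list if it has fewer than k slashes)
def splitc : List Char → List (List Char)
  | [] => [[]]
  | x :: r =>
      if x = '/' then [] :: splitc r
      else
        match splitc r with
        | [] => [[x]]
        | q :: qs => (x :: q) :: qs

def truncK : Nat → List Char → List Char
  | _, [] => []
  | k, x :: r =>
      if x = '/' then (if k = 1 then [] else '/' :: truncK (k - 1) r)
      else x :: truncK k r

theorem splitc_ne_nil (cs : List Char) : splitc cs ≠ [] := by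
  induction cs with
  | nil => simp [splitc]
  | cons x r ih =>
    simp only [splitc]
    split
    · simp
    · cases h : splitc r with
      | nil => simp
      | cons q qs => simp

theorem count_go_spec (fuel : Nat) : ∀ (l : List Char) (acc : Nat), l.length ≤ fuel →
    PySem.Chars.count.go ['/'] fuel l acc = acc + l.count '/' := by
  induction fuel with
  | zero => intro l acc h; simp at h; simp [h, PySem.Chars.count.go]
  | succ f ih =>
    intro l acc h
    cases l with
    | nil => simp [PySem.Chars.count.go]
    | cons x r =>
      simp only [PySem.Chars.count.go, List.isPrefixOf, Bool.and_true]
      by_cases hx : x = '/'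
      · simp [hx, ih r _ (by simpa using Nat.le_of_succ_le_succ h), List.count_cons]
        omega
      · have : ('/' == x) = false := by simp [Ne.symm hx]
        simp [this, ih r _ (by simpa using Nat.le_of_succ_le_succ h), List.count_cons]
        exact hx

theorem count_single (cs : List Char) : PySem.Chars.count cs ['/'] = cs.count '/' := by
  simp [PySem.Chars.count, count_go_spec cs.length cs 0 (by omega)]

theorem find_go_single (l : List Char) : ∀ (k : Nat),
    PySem.Chars.find.go ['/'] l k =
      if '/' ∈ l then ((k + l.idxOf '/' : Nat) : Int) else -1 := by
  induction l with
  | nil => intro k; simp [PySem.Chars.find.go]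
  | cons x r ih =>
    intro k
    by_cases hx : x = '/'
    · simp [PySem.Chars.find.go, List.isPrefixOf, hx, List.idxOf_cons]
    · have hpre : (['/'].isPrefixOf (x :: r)) = false := by
        simp [List.isPrefixOf, Ne.symm hx]
      rw [PySem.Chars.find.go]
      simp only [hpre, if_false, ih (k+1), List.mem_cons]
      by_cases hm : '/' ∈ r
      · simp [hm, Ne.symm hx, List.idxOf_cons, hx]
        omega
      · simp [hm, Ne.symm hx, hx]

theorem find_single (l : List Char) :
    PySem.Chars.find l ['/'] = if '/' ∈ l then ((l.idxOf '/' : Nat) : Int) else -1 := by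
  simp [PySem.Chars.find, find_go_single]

theorem splitOn_go_spec (fuel : Nat) : ∀ (l cur : List Char) (acc : List (List Char)),
    l.length < fuel →
    PySem.Chars.splitOn.go ['/'] fuel l cur acc =
      acc.reverse ++ (match splitc l with
        | [] => [cur.reverse]
        | q :: qs => (cur.reverse ++ q) :: qs) := by
  induction fuel with
  | zero => intro l cur acc h; omega
  | succ f ih =>
    intro l cur acc h
    cases l with
    | nil => simp [PySem.Chars.splitOn.go, splitc]
    | cons x r =>
      by_cases hx : x = '/'
      · have hpre : (['/'].isPrefixOf (x :: r)) = true := by simp [List.isPrefixOf, hx]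
        rw [PySem.Chars.splitOn.go]
        simp only [hpre, if_true, List.length_cons, List.length_nil, List.length_singleton,
          List.drop_succ_cons, List.drop_zero] at *
        rw [ih r [] (cur.reverse :: acc) (by omega)]
        simp only [splitc, hx, if_true]
        cases hs : splitc r with
        | nil => exact absurd hs (splitc_ne_nil r)
        | cons q qs => simp
      · have hpre : (['/'].isPrefixOf (x :: r)) = false := by simp [List.isPrefixOf, Ne.symm hx]
        rw [PySem.Chars.splitOn.go]
        simp only [hpre, if_false, Bool.false_eq_true]
        rw [ih r (x :: cur) acc (by simp at h ⊢; omega)]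
        simp only [splitc, hx, if_false]
        cases hs : splitc r with
        | nil => exact absurd hs (splitc_ne_nil r)
        | cons q qs => simp

theorem splitOn_single (cs : List Char) : PySem.Chars.splitOn cs ['/'] = splitc cs := by
  rw [PySem.Chars.splitOn, splitOn_go_spec (cs.length + 1) cs [] [] (by omega)]
  cases hs : splitc cs with
  | nil => exact absurd hs (splitc_ne_nil cs)
  | cons q qs => simp

theorem truncK_of_count_lt (cs : List Char) : ∀ (k : Nat), cs.count '/' < k →
    truncK k cs = cs := by
  induction cs with
  | nil => intro k h; simp [truncK]
  | cons x r ih =>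
    intro k h
    by_cases hx : x = '/'
    · subst hx
      simp [List.count_cons] at h
      have hk : ¬ k = 1 := by omega
      simp [truncK, hk, ih (k-1) (by omega)]
    · simp [List.count_cons, hx] at h
      simp [truncK, hx, ih k h]

theorem join_take_truncK (cs : List Char) : ∀ (k : Nat), 1 ≤ k →
    PySem.Chars.join ['/'] ((splitc cs).take k) = truncK k cs := by
  induction cs with
  | nil =>
    intro k hk
    cases k with
    | zero => omega
    | succ k => simp [splitc, truncK, PySem.Chars.join_singleton]
  | cons x r ih =>
    intro k hk
    by_cases hx : x = '/'
    · subst hx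
      simp only [splitc, if_true, truncK]
      by_cases h1 : k = 1
      · subst h1; simp [PySem.Chars.join_singleton]
      · obtain ⟨m, rfl⟩ : ∃ m, k = m + 1 + 1 := ⟨k - 2, by omega⟩
        rw [List.take_succ_cons]
        cases hs : splitc r with
        | nil => exact absurd hs (splitc_ne_nil r)
        | cons q qs =>
          rw [List.take_succ_cons, PySem.Chars.join_cons_cons, ← List.take_succ_cons, ← hs,
            ih (m + 1) (by omega)]
          simp
    · simp only [splitc, hx, if_false, truncK]
      cases hs : splitc r with
      | nil => exact absurd hs (splitc_ne_nil r)
      | cons q qs =>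
        obtain ⟨k', rfl⟩ : ∃ k', k = k' + 1 := ⟨k - 1, by omega⟩
        rw [List.take_succ_cons]
        have := ih (k' + 1) (by omega)
        rw [hs, List.take_succ_cons] at this
        rw [← this]
        cases (qs.take k') with
        | nil => simp [PySem.Chars.join, List.intercalate]
        | cons a as => simp [PySem.Chars.join, List.intercalate]

theorem truncK_one_eq_take_idxOf (cs : List Char) (h : '/' ∈ cs) :
    truncK 1 cs = cs.take (cs.idxOf '/') := by
  induction cs with
  | nil => simp at h
  | cons x r ih =>
    by_cases hx : x = '/'
    · subst hx; simp [truncK, List.idxOf_cons]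
    · have hm : '/' ∈ r := by
        rcases List.mem_cons.mp h with h1 | h1
        · exact absurd h1.symm hx
        · exact h1
      have : (x :: r).idxOf '/' = r.idxOf '/' + 1 := by
        have : (x == '/') = false := by simp [hx]
        simp [List.idxOf_cons, this]
      rw [this, List.take_succ_cons]
      simp [truncK, hx, ih hm]

theorem truncK_succ_decomp (w : List Char) : ∀ (u : List Char) (k : Nat), '/' ∉ w → 1 ≤ k →
    truncK (k + 1) (w ++ '/' :: u) = w ++ '/' :: truncK k u := by
  induction w with
  | nil =>
    intro u k _ hk
    have : ¬ (k = 0) := by omega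
    simp [truncK, this]
  | cons x w ih =>
    intro u k hw hk
    have hx : ¬ x = '/' := fun h => hw (by simp [h])
    have hw' : '/' ∉ w := fun h => hw (by simp [h])
    simp [truncK, hx, ih u k hw' hk]

theorem mem_decomp (cs : List Char) (h : '/' ∈ cs) :
    ∃ w u, cs = w ++ '/' :: u ∧ '/' ∉ w ∧ w.length = cs.idxOf '/' := by
  induction cs with
  | nil => simp at h
  | cons x r ih =>
    by_cases hx : x = '/'
    · exact ⟨[], r, by simp [hx], by simp, by simp [hx, List.idxOf_cons]⟩
    · have hm : '/' ∈ r := by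
        rcases List.mem_cons.mp h with h1 | h1
        · exact absurd h1.symm hx
        · exact h1
      obtain ⟨w, u, h1, h2, h3⟩ := ih hm
      have hb : (x == '/') = false := by simp [hx]
      exact ⟨x :: w, u, by simp [h1], by simp [Ne.symm hx, h2], by
        simp [List.idxOf_cons, hb, h3]⟩

theorem loop_spec : ∀ (k : Nat), 1 ≤ k → ∀ (q : Nat) (s : String), q ≤ s.toList.length →
    k ≤ ((s.toList.drop q).count '/') →
    ∃ r : Nat, find_nth_go s "/" k ((q : Int) - 1) = (r : Int) ∧ r ≤ s.toList.length ∧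
      s.toList.take r = s.toList.take q ++ truncK k (s.toList.drop q) := by
  intro k
  induction k with
  | zero => intro h; omega
  | succ i ih =>
    intro _ q s hq hc
    have hmem : '/' ∈ s.toList.drop q := by
      have : 0 < (s.toList.drop q).count '/' := by omega
      exact List.count_pos_iff.mp this
    set i₀ : Nat := (s.toList.drop q).idxOf '/' with hi₀
    have hi₀lt : i₀ < (s.toList.drop q).length := List.idxOf_lt_length_of_mem hmem
    have hlen : (s.toList.drop q).length = s.toList.length - q := by simp
    have hstep : PySem.Str.findFrom s "/" (((q : Int) - 1) + 1) = ((q + i₀ : Nat) : Int) := by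
      have h1 : ((q : Int) - 1) + 1 = ((q : Nat) : Int) := by ring
      rw [h1, PySem.Str.findFrom_eq]
      have : ("/" : String).toList = ['/'] := by decide
      rw [this, PySem.Chars.findFrom_natCast s.toList ['/'] q hq, find_single]
      have hne : ¬ (((i₀ : Nat) : Int) = -1) := by omega
      simp only [hmem, if_true, ← hi₀, hne, if_false]
      push_cast; ring
    obtain ⟨w, u, hdec, hw, hwl⟩ := mem_decomp _ hmem
    rw [← hi₀] at hwl
    have hdropq' : s.toList.drop (q + i₀ + 1) = u := by
      have : s.toList.drop (q + i₀ + 1) = (s.toList.drop q).drop (i₀ + 1) := by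
        rw [List.drop_drop]; ring_nf
      rw [this, hdec, ← hwl]
      simp [List.drop_append_of_le_length]
    have htakeq' : s.toList.take (q + i₀ + 1) = s.toList.take q ++ w ++ ['/'] := by
      have h2 : s.toList.take (q + (i₀ + 1)) = s.toList.take q ++ (s.toList.drop q).take (i₀ + 1) := List.take_add
      have h3 : (s.toList.drop q).take (i₀ + 1) = w ++ ['/'] := by
        rw [hdec, ← hwl, List.take_append]
        simp
      calc s.toList.take (q + i₀ + 1) = s.toList.take (q + (i₀ + 1)) := by ring_nf
        _ = s.toList.take q ++ (w ++ ['/']) := by rw [h2, h3]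
        _ = s.toList.take q ++ w ++ ['/'] := by simp
    cases Nat.eq_zero_or_pos i with
    | inl hi =>
      subst hi
      refine ⟨q + i₀, ?_, by omega, ?_⟩
      · show (let p := PySem.Str.findFrom s "/" (((q:Int) - 1) + 1);
            if p = -1 then -1 else find_nth_go s "/" 0 p) = _
        simp only [hstep]
        have : ¬ (((q + i₀ : Nat) : Int) = -1) := by omega
        rw [if_neg this]
        rfl
      · rw [List.take_add, truncK_one_eq_take_idxOf _ hmem]
    | inr hi =>
      have hcu : i ≤ u.count '/' := by
        have : (s.toList.drop q).count '/' = u.count '/' + 1 := by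
          rw [hdec]
          have : List.count '/' w = 0 := List.count_eq_zero.mpr hw
          simp [List.count_append, this]
        omega
      obtain ⟨r, hr1, hr2, hr3⟩ := ih hi (q + i₀ + 1) s (by omega) (by rw [hdropq']; exact hcu)
      refine ⟨r, ?_, hr2, ?_⟩
      · simp only [find_nth_go, hstep]
        have hne : ¬ (((q + i₀ : Nat) : Int) = -1) := by omega
        have hcast : ((q + i₀ : Nat) : Int) = ((q + i₀ + 1 : Nat) : Int) - 1 := by push_cast; ring
        simp only [hne, if_false]
        rw [hcast]
        exact hr1
      · rw [hr3, hdropq', htakeq', hdec, truncK_succ_decomp w u i hw hi]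
        simp

theorem per_link (link : String) (depth : Int) (hd : -2 ≤ depth) :
    (if ((PySem.Str.count link "/" : Int) > 2 + depth) then
        PySem.Str.slice link none (some (find_nth_occurrence link "/" (3 + depth)))
      else link)
    = PySem.Str.join "/"
        (PySem.List.slice ((PySem.Str.split? link "/").getD []) none (some (3 + depth))) := by
  have hsep : ("/" : String).toList = ['/'] := by decide
  set cs := link.toList with hcs
  set k : Nat := (3 + depth).toNat with hk
  have hkd : ((k : Nat) : Int) = 3 + depth := by omega
  have hk1 : 1 ≤ k := by omega
  have hrhs : PySem.Str.join "/"
      (PySem.List.slice ((PySem.Str.split? link "/").getD []) none (some (3 + depth)))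
      = String.ofList (truncK k cs) := by
    rw [PySem.Str.split?]
    rw [hsep, PySem.Chars.split?]
    have : (['/'] : List Char).isEmpty = false := by decide
    rw [this]
    simp only [Bool.false_eq_true, if_false, Option.map_some, Option.getD_some]
    rw [splitOn_single, ← hkd,
      PySem.List.slice_to _ (show (0:Int) ≤ ((k:Nat):Int) by omega), Int.toNat_natCast,
      ← List.map_take, PySem.Str.join]
    rw [hsep]
    rw [List.map_map]
    have hid : List.map (String.toList ∘ String.ofList) (List.take k (splitc link.toList))
        = List.take k (splitc cs) := by simp [Function.comp_def]; rfl
    rw [hid, join_take_truncK cs k hk1]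
  rw [hrhs]
  have hcount : (PySem.Str.count link "/" : Int) = (cs.count '/' : Int) := by
    rw [PySem.Str.count_eq, hsep, count_single]
  by_cases hg : (PySem.Str.count link "/" : Int) > 2 + depth
  · rw [if_pos hg]
    have hcnt : k ≤ cs.count '/' := by
      rw [hcount] at hg; omega
    obtain ⟨r, hr1, hr2, hr3⟩ := loop_spec k hk1 0 link (by omega) (by simpa using hcnt)
    have hfno : find_nth_occurrence link "/" (3 + depth) = (r : Int) := by
      rw [find_nth_occurrence, ← hkd, Int.toNat_natCast]
      have : ((0 : Nat) : Int) - 1 = -1 := by ring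
      rw [← this, hr1]
    rw [hfno, PySem.Str.slice]
    rw [PySem.Chars.slice_eq_listSlice,
      PySem.List.slice_to _ (show (0:Int) ≤ ((r:Nat):Int) by omega), Int.toNat_natCast]
    simp only [List.take_zero, List.drop_zero, List.nil_append] at hr3
    rw [hr3]
  · rw [if_neg hg]
    have hcnt : cs.count '/' < k := by rw [hcount] at hg; omega
    rw [truncK_of_count_lt cs k hcnt, hcs, String.ofList_toList]

theorem main_eq (links : List String) (domain : String) (depth : Int)
    (hnD : ¬ (depth ≤ -3 ∧ links ≠ [])) :
    parse_depth_links links domain depth = parse_depth_links_alt links domain depth := by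
  by_cases hl : links = []
  · subst hl; rfl
  · have hd : -2 ≤ depth := by
      by_contra h
      exact hnD ⟨by omega, hl⟩
    unfold parse_depth_links parse_depth_links_alt
    congr 1
    funext acc link
    simp only [per_link link depth hd]

-- ===== VERDICT (by name: the statement is the Claim_ definition above) =====
theorem parse_depth_links_spec : Claim_unchanged_parse_depth_links := by
  intro links domain depth _ hnD
  have h : ¬ (depth ≤ -3 ∧ links ≠ []) := fun h => hnD h
  exact main_eq links domain depth h

theorem parse_depth_links_changed : Claim_changed_parse_depth_links := by
  unfold Claim_changed_parse_depth_links; decide
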